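-- pv_equiv track=rewrite | github.com/boz83/QAC | QAC_Daily_Challenges/challenge_22nd_July.py | function
-- ===== SOURCE A (Python) =====
-- def function(input):
--     x = input.split(' ') #converts input to a list
--     x = set(x)  # removes dublicates + sorts items
--     x = sorted(x)
--     result = '' #converts back into a string
--     for i in x:
--         result = result + i + ' ' # loop appends each item with white space between
--     return result
-- ===== SOURCE B (Python) =====
-- def function(input):
--     words = sorted(input.split(' '))  # sort with duplicates kept
--     result = ''
--     prev = None
--     for w in words:  # duplicates are adjacent after sorting: emit on change
--         if prev is None or w != prev:
--             result = result + w + ' '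
--         prev = w
--     return result
-- ===== Notes on version B (the rewrite author's own statement) =====
-- stated objective: alternative
-- what changed: B drops the set: it sorts the word list with duplicates kept and deduplicates in a single pass by comparing each word with the previously emitted one, appending word+space on change.
import Mathlib
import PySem

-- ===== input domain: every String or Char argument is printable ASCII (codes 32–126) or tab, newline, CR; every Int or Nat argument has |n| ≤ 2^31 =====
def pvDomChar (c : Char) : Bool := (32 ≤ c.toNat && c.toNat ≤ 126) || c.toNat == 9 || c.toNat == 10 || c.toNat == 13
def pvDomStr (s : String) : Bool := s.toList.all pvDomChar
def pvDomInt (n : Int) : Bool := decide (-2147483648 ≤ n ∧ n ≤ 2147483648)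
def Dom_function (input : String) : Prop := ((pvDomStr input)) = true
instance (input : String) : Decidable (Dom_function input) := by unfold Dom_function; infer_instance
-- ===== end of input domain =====

-- B replaces A's set with a single adjacency-dedup pass over the sorted word list (alternative decomposition, same cost).

-- ===== PORT A =====
def function (input : String) : String :=
  let x := (PySem.Str.split? input " ").getD []  -- sep " " is non-empty, so split? is always some
  let x := PySem.Set.ofList x
  let x := PySem.List.sorted x (fun s => s) false
  x.foldl (fun result i => result ++ i ++ " ") ""

-- ===== PORT B =====
-- loop body of Source B: emit w + ' ' if prev is None or w != prev; always set prev := w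
def bStep (s : String × Option String) (w : String) : String × Option String :=
  match s.2 with
  | none => (s.1 ++ w ++ " ", some w)
  | some p => if w ≠ p then (s.1 ++ w ++ " ", some w) else (s.1, some w)

def function_alt (input : String) : String :=
  let words := PySem.List.sorted ((PySem.Str.split? input " ").getD []) (fun s => s) false  -- sep " " is non-empty, so split? is always some
  (words.foldl bStep ("", none)).1

-- ===== PRECONDITION & SPEC =====
def Spec_function (input : String) (out : String) : Prop := out = function_alt input
instance (input : String) (out : String) : Decidable (Spec_function input out) := by unfold Spec_function; infer_instance

-- ===== CLAIM (what is proved, stated in full; the proofs are below) =====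
def Claim_equal_function : Prop := ∀ (input : String), Dom_function input → Spec_function input (function input)

-- ===== LEMMAS AND PROOFS =====

-- the list of words B's loop emits, as a function of the prev state
def dAux (prev : Option String) : List String → List String
  | [] => []
  | w :: t => if prev = some w then dAux (some w) t else w :: dAux (some w) t

theorem foldl_bStep (l : List String) (acc : String) (prev : Option String) :
    (l.foldl bStep (acc, prev)).1
      = (dAux prev l).foldl (fun result i => result ++ i ++ " ") acc := by
  induction l generalizing acc prev with
  | nil => simp [dAux]
  | cons w t ih =>
    cases prev with
    | none => simp [dAux, bStep, ih]
    | some p =>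
      by_cases h : w = p
      · subst h; simp [dAux, bStep, ih]
      · simp [dAux, bStep, h, Ne.symm h, ih]

theorem dAux_some_spec (l : List String) (hs : l.Pairwise (· ≤ ·)) :
    ∀ p : String, (∀ x ∈ l, p ≤ x) →
      (dAux (some p) l).Pairwise (· < ·) ∧
      (∀ x, x ∈ dAux (some p) l ↔ x ∈ l ∧ x ≠ p) := by
  induction l with
  | nil => intro p _; simp [dAux]
  | cons a t ih =>
    intro p hlb
    have hpa : p ≤ a := hlb a (by simp)
    have hat : ∀ x ∈ t, a ≤ x := fun x hx => (List.pairwise_cons.mp hs).1 x hx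
    have ht : t.Pairwise (· ≤ ·) := (List.pairwise_cons.mp hs).2
    obtain ⟨ihp, ihm⟩ := ih ht a hat
    by_cases h : p = a
    · subst h
      have key : dAux (some p) (p :: t) = dAux (some p) t := by simp [dAux]
      constructor
      · rw [key]; exact ihp
      · intro x
        rw [key, ihm x]
        simp only [List.mem_cons]
        constructor
        · rintro ⟨hx, hxp⟩; exact ⟨Or.inr hx, hxp⟩
        · rintro ⟨hx | hx, hxp⟩
          · exact absurd hx hxp
          · exact ⟨hx, hxp⟩
    · have hpa' : p < a := lt_of_le_of_ne hpa (by exact fun e => h e)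
      have key : dAux (some p) (a :: t) = a :: dAux (some a) t := by
        simp [dAux, h]
      constructor
      · rw [key]
        refine List.pairwise_cons.mpr ⟨?_, ihp⟩
        intro x hx
        obtain ⟨hxt, hxa⟩ := (ihm x).mp hx
        exact lt_of_le_of_ne (hat x hxt) (Ne.symm hxa)
      · intro x
        rw [key]
        simp only [List.mem_cons, ihm]
        constructor
        · rintro (rfl | ⟨hx, hxa⟩)
          · exact ⟨Or.inl rfl, fun e => h e.symm⟩
          · refine ⟨Or.inr hx, ?_⟩
            intro e; subst e
            exact absurd (le_antisymm hpa (hat x hx)) (fun e => h e)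
        · rintro ⟨rfl | hx, hxp⟩
          · exact Or.inl rfl
          · by_cases hxa : x = a
            · exact Or.inl hxa
            · exact Or.inr ⟨hx, hxa⟩

theorem dAux_none_spec (l : List String) (hs : l.Pairwise (· ≤ ·)) :
    (dAux none l).Pairwise (· < ·) ∧ (∀ x, x ∈ dAux none l ↔ x ∈ l) := by
  cases l with
  | nil => simp [dAux]
  | cons a t =>
    have hat : ∀ x ∈ t, a ≤ x := fun x hx => (List.pairwise_cons.mp hs).1 x hx
    have ht : t.Pairwise (· ≤ ·) := (List.pairwise_cons.mp hs).2
    obtain ⟨ihp, ihm⟩ := dAux_some_spec t ht a hat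
    have key : dAux none (a :: t) = a :: dAux (some a) t := by simp [dAux]
    constructor
    · rw [key]
      refine List.pairwise_cons.mpr ⟨?_, ihp⟩
      intro x hx
      obtain ⟨hxt, hxa⟩ := (ihm x).mp hx
      exact lt_of_le_of_ne (hat x hxt) (Ne.symm hxa)
    · intro x
      rw [key]
      simp only [List.mem_cons, ihm]
      constructor
      · rintro (rfl | ⟨hx, _⟩)
        · exact Or.inl rfl
        · exact Or.inr hx
      · rintro (rfl | hx)
        · exact Or.inl rfl
        · by_cases hxa : x = a
          · exact Or.inl hxa
          · exact Or.inr ⟨hx, hxa⟩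

-- the heart: sorted(set(xs)) equals adjacency-dedup of sorted(xs)
theorem sorted_ofList_eq_dAux (xs : List String) :
    PySem.List.sorted (PySem.Set.ofList xs) (fun s => s) false
      = dAux none (PySem.List.sorted xs (fun s => s) false) := by
  set zs := PySem.List.sorted xs (fun s => s) false with hzs
  have hsle : zs.Pairwise (· ≤ ·) := PySem.List.sorted_pairwise xs (fun s => s)
  obtain ⟨hlt, hmem⟩ := dAux_none_spec zs hsle
  have hnd : (dAux none zs).Nodup := hlt.nodup
  have hperm : (dAux none zs).Perm (PySem.Set.ofList xs) := by
    rw [List.perm_ext_iff_of_nodup hnd (PySem.Set.nodup_ofList xs)]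
    intro a
    rw [hmem a, PySem.Set.mem_ofList, hzs, PySem.List.mem_sorted]
  exact PySem.List.sorted_eq_of_perm_of_pairwise_lt _ _ _ hperm hlt

-- ===== VERDICT (by name: the statement is the Claim_ definition above) =====
theorem function_spec : Claim_equal_function := by
  intro input _
  unfold Spec_function function function_alt
  simp only
  rw [foldl_bStep, sorted_ofList_eq_dAux]
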